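-- pv_equiv track=rewrite | github.com/joexu22/CodeSnippetsXu | PYTHON/SCRATCH/GroupStrings.py | getUniqueCharacters
-- ===== SOURCE A (Python) =====
-- def getUniqueCharacters(strings):
--     unique_characters = []
--     for string in strings:
--         for char in string:
--             if char not in unique_characters:
--                 unique_characters.append(char)
--     unique_characters.sort()
--     return unique_characters
-- ===== SOURCE B (Python) =====
-- def getUniqueCharacters(strings):
--     out = []
--     prev = None
--     for ch in sorted("".join(strings)):
--         if ch != prev:
--             out.append(ch)
--             prev = ch
--     return out
-- ===== Notes on version B (the rewrite author's own statement) =====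
-- stated objective: alternative
-- what changed: B flattens all strings, sorts the full multiset of characters once, and collapses adjacent duplicates in a single pass, instead of A's per-character membership scan of the growing unique list followed by a sort.
import Mathlib
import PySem

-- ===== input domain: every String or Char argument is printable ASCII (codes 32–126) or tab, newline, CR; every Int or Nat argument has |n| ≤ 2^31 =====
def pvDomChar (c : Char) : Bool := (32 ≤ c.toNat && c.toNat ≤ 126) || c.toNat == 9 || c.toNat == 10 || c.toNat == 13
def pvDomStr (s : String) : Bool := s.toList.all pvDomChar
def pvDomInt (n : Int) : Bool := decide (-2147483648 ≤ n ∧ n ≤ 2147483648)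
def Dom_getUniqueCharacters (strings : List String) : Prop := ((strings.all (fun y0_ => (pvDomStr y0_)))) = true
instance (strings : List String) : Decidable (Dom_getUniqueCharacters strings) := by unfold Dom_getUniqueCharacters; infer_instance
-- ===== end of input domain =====

-- B replaces A's per-character membership scan of the growing unique list by one sort of all
-- characters followed by a single adjacent-duplicate-collapsing pass (objective: alternative).

-- ===== PORT A =====
-- Python characters are 1-char strings; the ports keep them as Lean Char while iterating and
-- render them back to Strings at the return boundary (value-identical for single characters).
def getUniqueCharacters (strings : List String) : List String :=
  let u := strings.foldl (fun acc s =>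
      s.toList.foldl (fun acc c => if c ∈ acc then acc else acc ++ [c]) acc) []
  (PySem.List.sorted u (fun x => x) false).map (fun c => String.ofList [c])

-- ===== PORT B =====
def getUniqueCharacters_alt (strings : List String) : List String :=
  -- ''.join(strings) is exactly the concatenation of the strings' characters
  let chars := PySem.List.sorted ((strings.map String.toList).flatten) (fun x => x) false
  let res := chars.foldl (fun st ch =>
      match st.2 with
      | some p => if ch = p then st else (st.1 ++ [ch], some ch)
      | none => (st.1 ++ [ch], some ch))
    (([] : List Char), (none : Option Char))
  res.1.map (fun c => String.ofList [c])

-- ===== PRECONDITION & SPEC =====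
def Spec_getUniqueCharacters (strings : List String) (out : List String) : Prop := out = getUniqueCharacters_alt strings
instance (strings : List String) (out : List String) : Decidable (Spec_getUniqueCharacters strings out) := by unfold Spec_getUniqueCharacters; infer_instance

-- ===== CLAIM (what is proved, stated in full; the proofs are below) =====
def Claim_equal_getUniqueCharacters : Prop := ∀ (strings : List String), Dom_getUniqueCharacters strings → Spec_getUniqueCharacters strings (getUniqueCharacters strings)

-- ===== LEMMAS AND PROOFS =====

-- A's accumulation step, over the flattened character stream
def pvStepA (acc : List Char) (c : Char) : List Char := if c ∈ acc then acc else acc ++ [c]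

lemma pvFoldA_eq_flatten (strings : List String) (acc : List Char) :
    strings.foldl (fun acc s => s.toList.foldl pvStepA acc) acc
      = ((strings.map String.toList).flatten).foldl pvStepA acc := by
  induction strings generalizing acc with
  | nil => simp
  | cons s t ih => simp [List.foldl_append, ih]

lemma pvFoldA_nodup_mem (cs : List Char) (acc : List Char) (h : acc.Nodup) :
    (cs.foldl pvStepA acc).Nodup ∧ ∀ x, x ∈ cs.foldl pvStepA acc ↔ x ∈ acc ∨ x ∈ cs := by
  induction cs generalizing acc with
  | nil => simp [h]
  | cons c t ih =>
    by_cases hc : c ∈ acc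
    · have := ih acc h
      simp only [List.foldl_cons, pvStepA, if_pos hc] at *
      refine ⟨this.1, fun x => ?_⟩
      rw [this.2]
      constructor
      · rintro (hx | hx) <;> simp_all
      · rintro (hx | hx)
        · exact Or.inl hx
        · rcases List.mem_cons.mp hx with rfl | hx
          · exact Or.inl hc
          · exact Or.inr hx
    · have hnd : (acc ++ [c]).Nodup := by
        have hdisj : ∀ a ∈ acc, a ≠ c := fun a ha hac => hc (hac ▸ ha)
        rw [List.nodup_append]
        exact ⟨h, List.nodup_singleton c, fun a ha b hb => (List.mem_singleton.mp hb) ▸ hdisj a ha⟩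
      have := ih (acc ++ [c]) hnd
      simp only [List.foldl_cons, pvStepA, if_neg hc] at *
      refine ⟨this.1, fun x => ?_⟩
      rw [this.2]
      simp [List.mem_append, or_assoc]

-- B's collapsing pass, characterised by a structural recursion on the sorted list
def pvLoopB : List Char → Option Char → List Char
  | [], _ => []
  | c :: cs, prev => if some c = prev then pvLoopB cs prev else c :: pvLoopB cs (some c)

lemma pvFoldB_fst (cs : List Char) (out : List Char) (prev : Option Char) :
    (cs.foldl (fun st ch =>
        match st.2 with
        | some p => if ch = p then st else (st.1 ++ [ch], some ch)
        | none => (st.1 ++ [ch], some ch)) (out, prev)).1 = out ++ pvLoopB cs prev := by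
  induction cs generalizing out prev with
  | nil => simp [pvLoopB]
  | cons c t ih =>
    cases prev with
    | none => simp [pvLoopB, ih]
    | some p =>
      by_cases hc : c = p
      · subst hc; simp [pvLoopB, ih]
      · simp only [List.foldl_cons, pvLoopB]
        rw [if_neg hc, if_neg (by simpa using hc)]
        simp [ih]

lemma pvLoopB_some (cs : List Char) (p : Char) (hs : cs.Pairwise (· ≤ ·)) (hp : ∀ c ∈ cs, p ≤ c) :
    (pvLoopB cs (some p)).Pairwise (· < ·)
      ∧ (∀ x, x ∈ pvLoopB cs (some p) ↔ x ∈ cs ∧ x ≠ p)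
      ∧ (∀ x ∈ pvLoopB cs (some p), p < x) := by
  induction cs generalizing p with
  | nil => simp [pvLoopB]
  | cons c t ih =>
    have hhead : ∀ x ∈ t, c ≤ x := fun x hx => (List.pairwise_cons.mp hs).1 x hx
    have hst : t.Pairwise (· ≤ ·) := (List.pairwise_cons.mp hs).2
    by_cases hc : c = p
    · subst hc
      have h := ih c hst hhead
      have hdef : pvLoopB (c :: t) (some c) = pvLoopB t (some c) := by simp [pvLoopB]
      rw [hdef]
      refine ⟨h.1, fun x => ?_, h.2.2⟩
      rw [h.2.1]
      constructor
      · rintro ⟨hx, hne⟩; exact ⟨List.mem_cons_of_mem _ hx, hne⟩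
      · rintro ⟨hx, hne⟩
        rcases List.mem_cons.mp hx with rfl | hx
        · exact absurd rfl hne
        · exact ⟨hx, hne⟩
    · have hpc : p < c := lt_of_le_of_ne (hp c (List.mem_cons_self)) (fun h => hc h.symm)
      have h := ih c hst hhead
      have hdef : pvLoopB (c :: t) (some p) = c :: pvLoopB t (some c) := by simp [pvLoopB, hc]
      rw [hdef]
      refine ⟨?_, fun x => ?_, ?_⟩
      · exact List.pairwise_cons.mpr ⟨h.2.2, h.1⟩
      · constructor
        · intro hx
          rcases List.mem_cons.mp hx with rfl | hx
          · exact ⟨List.mem_cons_self, hc⟩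
          · have := (h.2.1 x).mp hx
            refine ⟨List.mem_cons_of_mem _ this.1, ?_⟩
            have : c < x := h.2.2 x hx
            exact fun hxp => absurd (hxp ▸ this) (not_lt.mpr (le_of_lt hpc))
        · rintro ⟨hx, hne⟩
          rcases List.mem_cons.mp hx with rfl | hx
          · exact List.mem_cons_self
          · by_cases hxc : x = c
            · subst hxc; exact List.mem_cons_self
            · exact List.mem_cons_of_mem _ ((h.2.1 x).mpr ⟨hx, hxc⟩)
      · intro x hx
        rcases List.mem_cons.mp hx with rfl | hx
        · exact hpc
        · exact lt_trans hpc (h.2.2 x hx)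

lemma pvLoopB_none (cs : List Char) (hs : cs.Pairwise (· ≤ ·)) :
    (pvLoopB cs none).Pairwise (· < ·) ∧ ∀ x, x ∈ pvLoopB cs none ↔ x ∈ cs := by
  cases cs with
  | nil => simp [pvLoopB]
  | cons c t =>
    have hhead : ∀ x ∈ t, c ≤ x := fun x hx => (List.pairwise_cons.mp hs).1 x hx
    have hst : t.Pairwise (· ≤ ·) := (List.pairwise_cons.mp hs).2
    have h := pvLoopB_some t c hst hhead
    have hdef : pvLoopB (c :: t) none = c :: pvLoopB t (some c) := by simp [pvLoopB]
    rw [hdef]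
    refine ⟨List.pairwise_cons.mpr ⟨h.2.2, h.1⟩, fun x => ?_⟩
    constructor
    · intro hx
      rcases List.mem_cons.mp hx with rfl | hx
      · exact List.mem_cons_self
      · exact List.mem_cons_of_mem _ ((h.2.1 x).mp hx).1
    · intro hx
      rcases List.mem_cons.mp hx with rfl | hx
      · exact List.mem_cons_self
      · by_cases hxc : x = c
        · subst hxc; exact List.mem_cons_self
        · exact List.mem_cons_of_mem _ ((h.2.1 x).mpr ⟨hx, hxc⟩)

-- ===== VERDICT (by name: the statement is the Claim_ definition above) =====
theorem getUniqueCharacters_spec : Claim_equal_getUniqueCharacters := by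
  intro strings _
  unfold Spec_getUniqueCharacters getUniqueCharacters getUniqueCharacters_alt
  show (PySem.List.sorted (strings.foldl (fun acc s => s.toList.foldl pvStepA acc) [])
          (fun x => x) false).map (fun c => String.ofList [c])
      = ((PySem.List.sorted ((strings.map String.toList).flatten) (fun x => x) false).foldl
          (fun st ch =>
            match st.2 with
            | some p => if ch = p then st else (st.1 ++ [ch], some ch)
            | none => (st.1 ++ [ch], some ch))
          (([] : List Char), (none : Option Char))).1.map (fun c => String.ofList [c])
  rw [pvFoldB_fst, List.nil_append, pvFoldA_eq_flatten]
  set flat := (strings.map String.toList).flatten with hflat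
  set u := flat.foldl pvStepA [] with hu
  have hU := pvFoldA_nodup_mem flat [] (by simp)
  rw [← hu] at hU
  have hsortedP : (PySem.List.sorted flat (fun x => x) false).Pairwise (· ≤ ·) :=
    PySem.List.sorted_pairwise flat (fun x => x)
  have hB := pvLoopB_none (PySem.List.sorted flat (fun x => x) false) hsortedP
  set ys := pvLoopB (PySem.List.sorted flat (fun x => x) false) none with hys
  have hmemys : ∀ x, x ∈ ys ↔ x ∈ flat := by
    intro x
    rw [hB.2 x, PySem.List.mem_sorted]
  have hyNodup : ys.Nodup := hB.1.imp (fun h => ne_of_lt h)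
  have hperm : ys.Perm u := by
    rw [List.perm_ext_iff_of_nodup hyNodup hU.1]
    intro x
    rw [hmemys x, hU.2 x]
    simp
  have hkey : PySem.List.sorted u (fun x => x) false = ys :=
    PySem.List.sorted_eq_of_perm_of_pairwise_lt u ys (fun x => x) hperm hB.1
  exact congrArg _ hkey
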